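-- pv_equiv track=rewrite | github.com/MykeFuchs/test_python_hack_2 | hack_1.py | solution
-- ===== SOURCE A (Python) =====
-- def solution(word):
--     result = ""
--     initialNumber = 2
--     if(len(word) > 2):
--         for letter in word:
--             result += letter
--             if(len(result) == initialNumber):
--                 x = result[-1]
--                 result = result[:-1] + str(x.upper())
--                 initialNumber += initialNumber + 1
--     else:
--         return word
--
--     return result
-- ===== SOURCE B (Python) =====
-- def solution(word):
--     if len(word) > 2:
--         positions = set()
--         t = 2
--         while t <= len(word):
--             positions.add(t - 1)
--             t = 2 * t + 1
--         return ''.join(c.upper() if i in positions else c for i, c in enumerate(word))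
--     else:
--         return word
-- ===== Notes on version B (the rewrite author's own statement) =====
-- stated objective: simpler
-- what changed: B precomputes the set of uppercase indices from the threshold chain t -> 2t+1 once, then builds the result in one enumerate/join pass, replacing A's growing-string accumulator with its moving initialNumber counter and per-hit string slicing/rebuilding.
import Mathlib
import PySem

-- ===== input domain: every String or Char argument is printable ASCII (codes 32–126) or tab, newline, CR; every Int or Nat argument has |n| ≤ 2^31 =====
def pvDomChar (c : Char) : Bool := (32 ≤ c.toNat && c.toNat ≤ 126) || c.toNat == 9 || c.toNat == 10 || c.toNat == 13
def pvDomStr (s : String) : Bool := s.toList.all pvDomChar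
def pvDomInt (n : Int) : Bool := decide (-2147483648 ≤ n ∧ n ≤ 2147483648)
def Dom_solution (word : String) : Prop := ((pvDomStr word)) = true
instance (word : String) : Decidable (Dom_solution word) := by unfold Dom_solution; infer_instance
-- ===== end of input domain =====

-- B replaces A's growing-string accumulator by a precomputed index set + single pass (simpler decomposition).

-- ===== PORT A =====
-- the loop: result accumulated in `res`, threshold in `n`; res[-1] exists whenever taken (res' = res ++ [c]),
-- so `.getD c` never supplies its default (exact)
def loopA : List Char → List Char → Int → List Char
  | [], res, _ => res
  | c :: cs, res, n =>
    let res' := res ++ [c]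
    if ((res'.length : Int)) = n then
      let x := (PySem.List.pyGet? res' (-1)).getD c
      loopA cs (PySem.List.slice res' none (some (-1)) ++ [PySem.Chars.upperChar x]) (n + (n + 1))
    else loopA cs res' n

def solution (word : String) : String :=
  if 2 < word.toList.length then String.ofList (loopA word.toList [] 2) else word

-- ===== PORT B =====
-- the while loop building the position set: positions.add(t-1); t = 2*t+1
def posLoop (t lim : Nat) (s : PySem.Set Int) : PySem.Set Int :=
  if t ≤ lim then posLoop (2 * t + 1) lim (PySem.Set.add s ((t : Int) - 1)) else s
  termination_by lim + 1 - t
  decreasing_by omega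

def solution_alt (word : String) : String :=
  let cs := word.toList
  if 2 < cs.length then
    let ps := posLoop 2 cs.length PySem.Set.empty
    String.ofList ((PySem.List.enumerate cs 0).map
      (fun p => if p.1 ∈ ps then PySem.Chars.upperChar p.2 else p.2))
  else word

-- ===== PRECONDITION & SPEC =====
def Spec_solution (word : String) (out : String) : Prop := out = solution_alt word
instance (word : String) (out : String) : Decidable (Spec_solution word out) := by unfold Spec_solution; infer_instance

-- ===== CLAIM (what is proved, stated in full; the proofs are below) =====
def Claim_equal_solution : Prop := ∀ (word : String), Dom_solution word → Spec_solution word (solution word)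

-- ===== LEMMAS AND PROOFS =====

-- pointwise description of A's loop: char at absolute position m is uppercased iff m+1 equals the current threshold
def markB : List Char → Nat → Int → List Char
  | [], _, _ => []
  | c :: cs, m, n =>
    if ((m : Int) + 1) = n then PySem.Chars.upperChar c :: markB cs (m + 1) (2 * n + 1)
    else c :: markB cs (m + 1) n

-- u is reachable from t by iterating t ↦ 2t+1
def reach (t u : Nat) : Prop := ∃ k, (fun n => 2 * n + 1)^[k] t = u

lemma reach_self (t : Nat) : reach t t := ⟨0, rfl⟩

lemma reach_of_step {t u : Nat} (h : reach (2 * t + 1) u) : reach t u := by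
  obtain ⟨k, hk⟩ := h
  exact ⟨k + 1, by simpa [Function.iterate_succ_apply] using hk⟩

lemma reach_inv {t u : Nat} (h : reach t u) : u = t ∨ reach (2 * t + 1) u := by
  obtain ⟨k, hk⟩ := h
  cases k with
  | zero => exact Or.inl hk.symm
  | succ k => exact Or.inr ⟨k, by simpa [Function.iterate_succ_apply] using hk⟩

lemma iter_ge : ∀ (k t : Nat), t ≤ (fun n => 2 * n + 1)^[k] t := by
  intro k
  induction k with
  | zero => intro t; simp
  | succ k ih =>
    intro t
    rw [Function.iterate_succ_apply]
    exact le_trans (by omega) (ih (2 * t + 1))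

lemma reach_le {t u : Nat} (h : reach t u) : t ≤ u := by
  obtain ⟨k, hk⟩ := h
  subst hk
  exact iter_ge k t

lemma mem_posLoop (t lim : Nat) (s : PySem.Set Int) (x : Int) :
    x ∈ posLoop t lim s ↔ x ∈ s ∨ ∃ u : Nat, reach t u ∧ u ≤ lim ∧ x = (u : Int) - 1 := by
  rw [posLoop]
  by_cases h : t ≤ lim
  · rw [if_pos h, mem_posLoop (2 * t + 1) lim _ x, PySem.Set.mem_add]
    constructor
    · rintro ((hs | rfl) | ⟨u, hu, hul, rfl⟩)
      · exact Or.inl hs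
      · exact Or.inr ⟨t, reach_self t, h, rfl⟩
      · exact Or.inr ⟨u, reach_of_step hu, hul, rfl⟩
    · rintro (hs | ⟨u, hu, hul, rfl⟩)
      · exact Or.inl (Or.inl hs)
      · rcases reach_inv hu with rfl | hu'
        · exact Or.inl (Or.inr rfl)
        · exact Or.inr ⟨u, hu', hul, rfl⟩
  · rw [if_neg h]
    constructor
    · exact Or.inl
    · rintro (hs | ⟨u, hu, hul, rfl⟩)
      · exact hs
      · exact absurd (reach_le hu) (by omega)
  termination_by lim + 1 - t
  decreasing_by omega

lemma markB_eq : ∀ (cs : List Char) (m t : Nat), m < t →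
    markB cs m (t : Int) =
      (PySem.List.enumerate cs (m : Int)).map
        (fun p => if p.1 ∈ posLoop t (m + cs.length) PySem.Set.empty then PySem.Chars.upperChar p.2 else p.2) := by
  intro cs
  induction cs with
  | nil => intro m t _; simp [markB, PySem.List.enumerate_nil]
  | cons c cs ih =>
    intro m t hmt
    rw [PySem.List.enumerate_cons, List.map_cons, markB]
    have hlim : m + (c :: cs).length = (m + 1) + cs.length := by simp; omega
    by_cases hcase : m + 1 = t
    · subst hcase
      rw [if_pos (by push_cast; ring)]
      have hhead : (m : Int) ∈ posLoop (m + 1) (m + (c :: cs).length) PySem.Set.empty := by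
        rw [mem_posLoop]
        exact Or.inr ⟨m + 1, reach_self _, by simp, by push_cast; ring⟩
      rw [if_pos hhead]
      congr 1
      have h2 : (2 * ((m : Int) + 1) + 1) = ((2 * (m + 1) + 1 : Nat) : Int) := by push_cast; ring
      rw [show ((m : Nat) : Int) + 1 = (((m + 1 : Nat)) : Int) by push_cast; ring] at *
      rw [h2, ih (m + 1) (2 * (m + 1) + 1) (by omega)]
      apply List.map_congr_left
      intro p hp
      rw [PySem.List.mem_enumerate_iff] at hp
      obtain ⟨k, hk, rfl⟩ := hp
      have hmem : ((m + 1 : Nat) : Int) + k ∈ posLoop (2 * (m + 1) + 1) ((m + 1) + cs.length) PySem.Set.empty ↔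
          ((m + 1 : Nat) : Int) + k ∈ posLoop (m + 1) (m + (c :: cs).length) PySem.Set.empty := by
        rw [mem_posLoop, mem_posLoop, hlim]
        constructor
        · rintro (h | ⟨u, hu, hul, hx⟩)
          · simp [PySem.Set.empty] at h
          · exact Or.inr ⟨u, reach_of_step hu, hul, hx⟩
        · rintro (h | ⟨u, hu, hul, hx⟩)
          · simp [PySem.Set.empty] at h
          · rcases reach_inv hu with rfl | hu'
            · exfalso; omega
            · exact Or.inr ⟨u, hu', hul, hx⟩
      simp only [hmem]
    · rw [if_neg (by omega)]
      have hhead : ¬ ((m : Int) ∈ posLoop t (m + (c :: cs).length) PySem.Set.empty) := by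
        rw [mem_posLoop]
        rintro (h | ⟨u, hu, _, hx⟩)
        · simp [PySem.Set.empty] at h
        · have := reach_le hu; omega
      rw [if_neg hhead]
      congr 1
      rw [show ((m : Nat) : Int) + 1 = (((m + 1 : Nat)) : Int) by push_cast; ring]
      rw [ih (m + 1) t (by omega)]
      apply List.map_congr_left
      intro p hp
      congr 2
      rw [hlim]

lemma loopA_eq : ∀ (cs res : List Char) (n : Int),
    loopA cs res n = res ++ markB cs res.length n := by
  intro cs
  induction cs with
  | nil => intro res n; simp [loopA, markB]
  | cons c cs ih =>
    intro res n
    rw [loopA, markB]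
    simp only [List.length_append, List.length_singleton]
    by_cases h : ((res.length : Int) + 1) = n
    · rw [if_pos (by push_cast; omega), if_pos h]
      rw [PySem.List.pyGet?_neg_one_append_singleton, Option.getD_some]
      have hslice : PySem.List.slice (res ++ [c]) none (some (-1)) = res := by
        have h1 := PySem.List.slice_to_neg_natCast (xs := res ++ [c]) (k := 1) (by omega)
        simpa using h1
      rw [hslice, ih]
      simp only [List.length_append, List.length_singleton]
      rw [show n + (n + 1) = 2 * n + 1 by ring]
      simp [List.append_assoc]
    · rw [if_neg (by push_cast; omega), if_neg h, ih]
      simp [List.append_assoc]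

-- ===== VERDICT (by name: the statement is the Claim_ definition above) =====
theorem solution_spec : Claim_equal_solution := by
  intro word _
  unfold Spec_solution solution solution_alt
  by_cases h : 2 < word.toList.length
  · rw [if_pos h, if_pos h]
    congr 1
    rw [loopA_eq, List.nil_append, List.length_nil,
        show (2 : Int) = ((2 : Nat) : Int) by norm_num,
        markB_eq word.toList 0 2 (by omega)]
    simp
  · rw [if_neg h, if_neg h]
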